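-- pv_equiv track=rewrite | github.com/santaiscoming/algorithm | 프로그래머스/2/340212. ［PCCP 기출문제］ 2번 ／ 퍼즐 게임 챌린지/［PCCP 기출문제］ 2번 ／ 퍼즐 게임 챌린지.py | solution
-- ===== SOURCE A (Python) =====
-- def get_time(lv, d, t):
--     ret = 0
--
--     for i in range(len(d)):
--         if d[i] <= lv:
--             ret += t[i]
--         else:
--             ret += (d[i] - lv) * (t[i] + t[i-1]) + t[i]
--
--     return ret
--
-- def solution(diffs, times, limit):
--     l, r = 1, max(diffs)
--     ans = r
--
--     while l <= r:
--         m = (l + r) // 2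
--
--         if get_time(m, diffs, times) <= limit:
--             ans = m
--             r = m - 1
--         else:
--             l = m + 1
--
--     return ans
-- ===== SOURCE B (Python) =====
-- def solution(diffs, times, limit):
--     n = len(diffs)
--     hi = max(diffs)
--     base = sum(times[i] for i in range(n))
--     pairs = sorted(((diffs[i], times[i] + times[i - 1]) for i in range(n)),
--                    key=lambda p: p[0])
--     cum = [(0, 0)]
--     Sw = 0
--     Sdw = 0
--     for d, w in pairs:
--         Sw += w
--         Sdw += d * w
--         cum.append((Sw, Sdw))
--
--     def total(lv):
--         lo, hic = 0, n
--         while lo < hic: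
--             mid = (lo + hic) // 2
--             if pairs[mid][0] <= lv:
--                 lo = mid + 1
--             else:
--                 hic = mid
--         pw, pdw = cum[lo]
--         return base + (Sdw - pdw) - lv * (Sw - pw)
--
--     l, r = 1, hi
--     ans = r
--     while l <= r:
--         m = (l + r) // 2
--         if total(m) <= limit:
--             ans = m
--             r = m - 1
--         else:
--             l = m + 1
--     return ans
-- ===== Notes on version B (the rewrite author's own statement) =====
-- stated objective: alternative
-- what changed: Keeps the bisection over candidate levels but replaces each probe's O(n) get_time rescan with an O(log n) evaluation: the (difficulty, weight) pairs are sorted once, prefix sums of weights and difficulty*weight are precomputed, and each probe finds the count of difficulties above the level by an index bisection and reads the total time off the prefix sums (algebraically equal to get_time for all integer inputs).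
-- outside the precondition, e.g. on solution([0, -2, -1, 0, -2, 0], [6, 6, 6], 2): A returns 0, B raises IndexError
import Mathlib
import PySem

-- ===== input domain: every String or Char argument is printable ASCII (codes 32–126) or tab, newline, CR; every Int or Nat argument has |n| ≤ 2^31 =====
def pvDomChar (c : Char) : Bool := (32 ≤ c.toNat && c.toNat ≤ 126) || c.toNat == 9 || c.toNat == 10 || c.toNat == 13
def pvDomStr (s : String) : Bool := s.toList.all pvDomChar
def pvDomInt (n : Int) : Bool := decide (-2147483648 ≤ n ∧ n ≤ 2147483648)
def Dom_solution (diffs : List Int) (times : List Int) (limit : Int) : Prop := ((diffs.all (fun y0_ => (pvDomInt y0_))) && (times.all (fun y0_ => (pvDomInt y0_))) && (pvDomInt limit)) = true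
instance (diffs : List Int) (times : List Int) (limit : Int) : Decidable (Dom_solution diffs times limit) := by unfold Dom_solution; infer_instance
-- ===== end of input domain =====

-- B keeps A's bisection over levels but answers each probe from one sort plus prefix sums
-- (an O(log n) lookup instead of A's O(n) get_time rescan per probe).

-- ===== PORT A =====
def getTime (lv : Int) (d : List Int) (t : List Int) : Int :=
  (PySem.List.pyRange 0 (PySem.List.len d) 1).foldl
    (fun ret i =>
      if PySem.List.pyGetD d i 0 ≤ lv then
        ret + PySem.List.pyGetD t i 0
      else
        ret + (PySem.List.pyGetD d i 0 - lv) *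
            (PySem.List.pyGetD t i 0 + PySem.List.pyGetD t (i - 1) 0) +
          PySem.List.pyGetD t i 0)
    0

def solLoop (diffs : List Int) (times : List Int) (limit l r ans : Int) : Int :=
  if h : l ≤ r then
    let m := PySem.Int.floordiv (l + r) 2
    if getTime m diffs times ≤ limit then solLoop diffs times limit l (m - 1) m
    else solLoop diffs times limit (m + 1) r ans
  else ans
termination_by (r + 1 - l).toNat
decreasing_by
  · have hb := PySem.Int.floordiv_two_mid_bounds h; omega
  · have hb := PySem.Int.floordiv_two_mid_bounds h; omega

-- max(diffs) raises on an empty list: Pre_ requires diffs ≠ [], so the .getD 0 default is never taken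
def solution (diffs : List Int) (times : List Int) (limit : Int) : Int :=
  let r := (PySem.List.max? diffs (fun x => x)).getD 0
  solLoop diffs times limit 1 r r

-- ===== PORT B =====
-- inner 'while lo < hic' of Source B's total: first index whose pair has difficulty > lv
def bisLoop (pairs : List (Int × Int)) (lv lo hic : Int) : Int :=
  if h : lo < hic then
    let mid := PySem.Int.floordiv (lo + hic) 2
    if (PySem.List.pyGetD pairs mid (0, 0)).1 ≤ lv then bisLoop pairs lv (mid + 1) hic
    else bisLoop pairs lv lo mid
  else lo
termination_by (hic - lo).toNat
decreasing_by
  · have hb := PySem.Int.floordiv_two_mid_bounds (le_of_lt h); omega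
  · have hb := PySem.Int.floordiv_two_mid_bounds (le_of_lt h)
    have hlt : PySem.Int.floordiv (lo + hic) 2 < hic :=
      (PySem.Int.floordiv_lt_iff_lt_mul (by norm_num)).mpr (by omega)
    omega

-- Source B's total(lv) closure
def totalB (pairs cum : List (Int × Int)) (base Sw Sdw n lv : Int) : Int :=
  let lo := bisLoop pairs lv 0 n
  let pw := (PySem.List.pyGetD cum lo (0, 0)).1
  let pdw := (PySem.List.pyGetD cum lo (0, 0)).2
  base + (Sdw - pdw) - lv * (Sw - pw)

-- body of Source B's 'for d, w in pairs' building cum and the running sums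
def cumStep (st : List (Int × Int) × Int × Int) (p : Int × Int) : List (Int × Int) × Int × Int :=
  (st.1 ++ [(st.2.1 + p.2, st.2.2 + p.1 * p.2)], st.2.1 + p.2, st.2.2 + p.1 * p.2)

def solLoopB (pairs cum : List (Int × Int)) (base Sw Sdw n limit l r ans : Int) : Int :=
  if h : l ≤ r then
    let m := PySem.Int.floordiv (l + r) 2
    if totalB pairs cum base Sw Sdw n m ≤ limit then
      solLoopB pairs cum base Sw Sdw n limit l (m - 1) m
    else solLoopB pairs cum base Sw Sdw n limit (m + 1) r ans
  else ans
termination_by (r + 1 - l).toNat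
decreasing_by
  · have hb := PySem.Int.floordiv_two_mid_bounds h; omega
  · have hb := PySem.Int.floordiv_two_mid_bounds h; omega

def solution_alt (diffs : List Int) (times : List Int) (limit : Int) : Int :=
  let n := PySem.List.len diffs
  let hi := (PySem.List.max? diffs (fun x => x)).getD 0
  let base := ((PySem.List.pyRange 0 n 1).map (fun i => PySem.List.pyGetD times i 0)).sum
  let pairs := PySem.List.sorted
    ((PySem.List.pyRange 0 n 1).map
      (fun i => (PySem.List.pyGetD diffs i 0,
                 PySem.List.pyGetD times i 0 + PySem.List.pyGetD times (i - 1) 0)))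
    (fun p => p.1) false
  let st := pairs.foldl cumStep ([(0, 0)], 0, 0)
  solLoopB pairs st.1 base st.2.1 st.2.2 n limit 1 hi hi

-- ===== PRECONDITION & SPEC =====
-- Pre_ excludes the inputs where A raises: empty diffs (max([]) is a ValueError) and, once
-- a probe runs, times shorter than diffs (get_time's t[i] is an IndexError). When
-- max(diffs) < 1 A's loop never probes, so A returns even with short times; B always builds
-- its pair table first and raises IndexError there, so shorter times stay excluded.
def Pre_solution (diffs : List Int) (times : List Int) (limit : Int) : Prop :=
  diffs ≠ [] ∧ diffs.length ≤ times.length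
instance (diffs : List Int) (times : List Int) (limit : Int) : Decidable (Pre_solution diffs times limit) := by unfold Pre_solution; infer_instance

def pvWitness_solution : List Int × List Int × Int := ([3, 1], [2, 4], 10)

def Spec_solution (diffs : List Int) (times : List Int) (limit : Int) (out : Int) : Prop := out = solution_alt diffs times limit
instance (diffs : List Int) (times : List Int) (limit : Int) (out : Int) : Decidable (Spec_solution diffs times limit out) := by unfold Spec_solution; infer_instance

-- ===== CLAIM (what is proved, stated in full; the proofs are below) =====
def Claim_equal_solution : Prop := ∀ (diffs : List Int) (times : List Int) (limit : Int), Dom_solution diffs times limit → Pre_solution diffs times limit → Spec_solution diffs times limit (solution diffs times limit)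

-- ===== LEMMAS AND PROOFS =====

-- mathematical views of the programs
def exS (lv : Int) (P : List (Int × Int)) : Int :=
  (P.map (fun p => if lv < p.1 then (p.1 - lv) * p.2 else 0)).sum
def swS (Q : List (Int × Int)) : Int := (Q.map (fun p => p.2)).sum
def sdwS (Q : List (Int × Int)) : Int := (Q.map (fun p => p.1 * p.2)).sum
def baseS (d : List Int) (t : List Int) : Int :=
  ((PySem.List.pyRange 0 (PySem.List.len d) 1).map (fun i => PySem.List.pyGetD t i 0)).sum
def pairsOf (d : List Int) (t : List Int) : List (Int × Int) :=
  (PySem.List.pyRange 0 (PySem.List.len d) 1).map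
    (fun i => (PySem.List.pyGetD d i 0, PySem.List.pyGetD t i 0 + PySem.List.pyGetD t (i - 1) 0))
def prefList (s0 s1 : Int) : List (Int × Int) → List (Int × Int)
  | [] => []
  | p :: L => (s0 + p.2, s1 + p.1 * p.2) :: prefList (s0 + p.2) (s1 + p.1 * p.2) L

theorem exS_append (lv : Int) (Q R : List (Int × Int)) :
    exS lv (Q ++ R) = exS lv Q + exS lv R := by
  simp [exS]

theorem swS_append (Q R : List (Int × Int)) : swS (Q ++ R) = swS Q + swS R := by
  simp [swS]

theorem sdwS_append (Q R : List (Int × Int)) : sdwS (Q ++ R) = sdwS Q + sdwS R := by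
  simp [sdwS]

theorem exS_eq_zero_of_le (lv : Int) (P : List (Int × Int)) (h : ∀ p ∈ P, p.1 ≤ lv) :
    exS lv P = 0 := by
  induction P with
  | nil => simp [exS]
  | cons q P ih =>
    have h1 := h q (by simp)
    have h2 : exS lv P = 0 := ih (fun p hp => h p (by simp [hp]))
    simp only [exS, List.map_cons, List.sum_cons] at *
    rw [if_neg (by omega)]
    omega

theorem exS_all_gt (lv : Int) (R : List (Int × Int)) (hR : ∀ p ∈ R, lv < p.1) :
    exS lv R = sdwS R - lv * swS R := by
  induction R with
  | nil => simp [exS, sdwS, swS]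
  | cons q R ih =>
    have h1 := hR q (by simp)
    have h2 : exS lv R = sdwS R - lv * swS R := ih (fun p hp => hR p (by simp [hp]))
    simp only [exS, sdwS, swS, List.map_cons, List.sum_cons] at *
    rw [if_pos h1]
    linear_combination h2

theorem exS_split_le_gt (lv : Int) (Q R : List (Int × Int))
    (hQ : ∀ p ∈ Q, p.1 ≤ lv) (hR : ∀ p ∈ R, lv < p.1) :
    exS lv (Q ++ R) = sdwS R - lv * swS R := by
  rw [exS_append, exS_eq_zero_of_le lv Q hQ, exS_all_gt lv R hR]
  omega

theorem getTime_eq (lv : Int) (d t : List Int) :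
    getTime lv d t = baseS d t + exS lv (pairsOf d t) := by
  unfold getTime
  rw [PySem.List.foldl_congr_mem _ _
    (fun ret i => ret + (PySem.List.pyGetD t i 0 +
      (if lv < PySem.List.pyGetD d i 0 then
        (PySem.List.pyGetD d i 0 - lv) * (PySem.List.pyGetD t i 0 + PySem.List.pyGetD t (i - 1) 0)
      else 0))) 0
    (by
      intro acc x hx
      beta_reduce
      by_cases hc : PySem.List.pyGetD d x 0 ≤ lv
      · rw [if_pos hc, if_neg (by omega)]
        ring
      · rw [if_neg hc, if_pos (by omega)]
        ring)]
  rw [PySem.List.foldl_add]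
  rw [PySem.List.sum_map_add_int]
  unfold baseS pairsOf exS
  rw [List.map_map]
  simp only [zero_add, Function.comp_def]

theorem cumFoldl_spec : ∀ (L : List (Int × Int)) (acc : List (Int × Int)) (s0 s1 : Int),
    L.foldl cumStep (acc, s0, s1) = (acc ++ prefList s0 s1 L, s0 + swS L, s1 + sdwS L) := by
  intro L
  induction L with
  | nil => intro acc s0 s1; simp [prefList, swS, sdwS]
  | cons p L ih =>
    intro acc s0 s1
    simp only [List.foldl_cons, cumStep]
    rw [ih]
    simp only [prefList, swS, sdwS, List.map_cons, List.sum_cons, List.append_assoc,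
      List.singleton_append]
    simp only [Prod.mk.injEq]
    exact ⟨by trivial, by ring, by ring⟩

theorem prefList_length (L : List (Int × Int)) : ∀ s0 s1, (prefList s0 s1 L).length = L.length := by
  induction L with
  | nil => intro s0 s1; rfl
  | cons p L ih => intro s0 s1; simp [prefList, ih]

theorem prefList_getElem (L : List (Int × Int)) :
    ∀ (s0 s1 : Int) (k : Nat) (hk : k < L.length),
      (prefList s0 s1 L)[k]'(by rw [prefList_length]; exact hk) =
        (s0 + swS (L.take (k + 1)), s1 + sdwS (L.take (k + 1))) := by
  induction L with
  | nil => intro s0 s1 k hk; simp at hk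
  | cons p L ih =>
    intro s0 s1 k hk
    cases k with
    | zero => simp [prefList, swS, sdwS]
    | succ k' =>
      have hk' : k' < L.length := by simpa using hk
      simp only [prefList, List.getElem_cons_succ, List.take_succ_cons]
      rw [ih (s0 + p.2) (s1 + p.1 * p.2) k' hk']
      simp only [swS, sdwS, List.map_cons, List.sum_cons, Prod.mk.injEq]
      exact ⟨by ring, by ring⟩

theorem cum_getElem (P : List (Int × Int)) (k : Nat) (hk : k ≤ P.length) :
    ([((0 : Int), (0 : Int))] ++ prefList 0 0 P)[k]'(by
      simp [prefList_length]; omega) = (swS (P.take k), sdwS (P.take k)) := by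
  cases k with
  | zero => simp [swS, sdwS]
  | succ k' =>
    have hk' : k' < P.length := by omega
    have := prefList_getElem P 0 0 k' hk'
    simp only [List.singleton_append, List.getElem_cons_succ]
    rw [this]
    simp

theorem bisLoop_spec (pairs : List (Int × Int)) (lv : Int)
    (hmono : ∀ i j : Nat, (hi : i < pairs.length) → (hj : j < pairs.length) → i ≤ j →
      (pairs[i]'hi).1 ≤ (pairs[j]'hj).1) :
    ∀ (N : Nat) (lo hic : Int), (hic - lo).toNat ≤ N → 0 ≤ lo → hic ≤ pairs.length →
      lo ≤ hic →
      (∀ j : Nat, (hj : j < pairs.length) →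
        ((j : Int) < lo → (pairs[j]'hj).1 ≤ lv) ∧ (hic ≤ (j : Int) → lv < (pairs[j]'hj).1)) →
      lo ≤ bisLoop pairs lv lo hic ∧ bisLoop pairs lv lo hic ≤ hic ∧
        (∀ j : Nat, (hj : j < pairs.length) →
          ((j : Int) < bisLoop pairs lv lo hic → (pairs[j]'hj).1 ≤ lv) ∧
          (bisLoop pairs lv lo hic ≤ (j : Int) → lv < (pairs[j]'hj).1)) := by
  intro N
  induction N with
  | zero =>
    intro lo hic hN h0 hlen hle hinv
    have heq : ¬ lo < hic := by omega
    rw [bisLoop, dif_neg heq]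
    exact ⟨le_refl _, by omega, fun j hj => ⟨(hinv j hj).1, fun h => (hinv j hj).2 (by omega)⟩⟩
  | succ n ih =>
    intro lo hic hN h0 hlen hle hinv
    by_cases hlt : lo < hic
    · rw [bisLoop, dif_pos hlt]
      have hb := PySem.Int.floordiv_two_mid_bounds (le_of_lt hlt)
      have hmidlt : PySem.Int.floordiv (lo + hic) 2 < hic :=
        (PySem.Int.floordiv_lt_iff_lt_mul (by norm_num)).mpr (by omega)
      set mid := PySem.Int.floordiv (lo + hic) 2 with hmid
      have hmidrange : 0 ≤ mid ∧ mid < pairs.length := by omega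
      have hget : PySem.List.pyGetD pairs mid (0, 0) = pairs[mid.toNat]'(by omega) :=
        PySem.List.pyGetD_eq_getElem pairs (0, 0) (by omega) (by omega)
      dsimp only
      by_cases hc : (PySem.List.pyGetD pairs mid (0, 0)).1 ≤ lv
      · rw [if_pos hc]
        refine (ih (mid + 1) hic (by omega) (by omega) hlen (by omega) ?_).imp
          (fun h => by omega) id
        intro j hj
        refine ⟨?_, (hinv j hj).2⟩
        intro hjlt
        calc (pairs[j]'hj).1 ≤ (pairs[mid.toNat]'(by omega)).1 :=
              hmono j mid.toNat hj (by omega) (by omega)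
          _ ≤ lv := by rw [← hget]; exact hc
      · rw [if_neg hc]
        refine (ih lo mid (by omega) h0 (by omega) (by omega) ?_).imp id
          (fun h => ⟨by omega, h.2⟩)
        intro j hj
        refine ⟨(hinv j hj).1, ?_⟩
        intro hjge
        calc lv < (pairs[mid.toNat]'(by omega)).1 := by rw [← hget]; omega
          _ ≤ (pairs[j]'hj).1 := hmono mid.toNat j (by omega) hj (by omega)
    · rw [bisLoop, dif_neg hlt]
      exact ⟨le_refl _, by omega, fun j hj => ⟨(hinv j hj).1, fun h => (hinv j hj).2 (by omega)⟩⟩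

theorem loops_eq (d t : List Int) (limit : Int) (pairs cum : List (Int × Int))
    (base Sw Sdw n : Int)
    (hpt : ∀ lv, totalB pairs cum base Sw Sdw n lv = getTime lv d t) :
    ∀ (N : Nat) (l r ans : Int), (r + 1 - l).toNat ≤ N →
      solLoopB pairs cum base Sw Sdw n limit l r ans = solLoop d t limit l r ans := by
  intro N
  induction N with
  | zero =>
    intro l r ans hN
    have hlr : ¬ l ≤ r := by omega
    rw [solLoopB, dif_neg hlr, solLoop, dif_neg hlr]
  | succ k ih =>
    intro l r ans hN
    by_cases hlr : l ≤ r
    · rw [solLoopB, dif_pos hlr, solLoop, dif_pos hlr]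
      have hb := PySem.Int.floordiv_two_mid_bounds hlr
      dsimp only
      rw [hpt]
      by_cases hc : getTime (PySem.Int.floordiv (l + r) 2) d t ≤ limit
      · rw [if_pos hc, if_pos hc]
        exact ih _ _ _ (by omega)
      · rw [if_neg hc, if_neg hc]
        exact ih _ _ _ (by omega)
    · rw [solLoopB, dif_neg hlr, solLoop, dif_neg hlr]

-- ===== VERDICT (by name: the statement is the Claim_ definition above) =====
theorem solution_spec : Claim_equal_solution := by
  unfold Claim_equal_solution
  intro diffs times limit _ hpre
  obtain ⟨hne, hlen⟩ := hpre
  unfold Spec_solution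
  obtain ⟨m, hm⟩ : ∃ m, PySem.List.max? diffs (fun x => x) = some m := by
    cases h : PySem.List.max? diffs (fun x => x) with
    | none => exact absurd ((PySem.List.max?_eq_none_iff _ _).mp h) hne
    | some m => exact ⟨m, rfl⟩
  have hA : solution diffs times limit = solLoop diffs times limit 1 m m := by
    unfold solution; rw [hm]
    rfl
  have hBdef : solution_alt diffs times limit =
      solLoopB (PySem.List.sorted (pairsOf diffs times) (fun p => p.1) false)
        ((PySem.List.sorted (pairsOf diffs times) (fun p => p.1) false).foldl
          cumStep ([(0, 0)], 0, 0)).1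
        (baseS diffs times)
        ((PySem.List.sorted (pairsOf diffs times) (fun p => p.1) false).foldl
          cumStep ([(0, 0)], 0, 0)).2.1
        ((PySem.List.sorted (pairsOf diffs times) (fun p => p.1) false).foldl
          cumStep ([(0, 0)], 0, 0)).2.2
        (PySem.List.len diffs) limit 1 m m := by
    unfold solution_alt pairsOf baseS; rw [hm]
    rfl
  set P0 := pairsOf diffs times with hP0
  set pairs := PySem.List.sorted P0 (fun p => p.1) false with hpairsdef
  have hcum : pairs.foldl cumStep ([(0, 0)], 0, 0) =
      ([((0 : Int), (0 : Int))] ++ prefList 0 0 pairs, swS pairs, sdwS pairs) := by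
    rw [cumFoldl_spec pairs [(0, 0)] 0 0]
    simp
  have hperm : pairs.Perm P0 := PySem.List.sorted_perm P0 (fun p => p.1) false
  have hplen : pairs.length = diffs.length := by
    rw [hperm.length_eq, hP0]
    unfold pairsOf
    rw [List.length_map, PySem.List.length_pyRange_one]
    simp [PySem.List.len_eq]
  have hex : ∀ lv, exS lv pairs = exS lv P0 := by
    intro lv
    exact List.Perm.sum_eq (hperm.map _)
  have hsorted : pairs.Pairwise (fun a b => a.1 ≤ b.1) :=
    PySem.List.sorted_pairwise P0 (fun p => p.1)
  have hmono : ∀ i j : Nat, (hi : i < pairs.length) → (hj : j < pairs.length) → i ≤ j →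
      (pairs[i]'hi).1 ≤ (pairs[j]'hj).1 := by
    intro i j hi hj hij
    rcases Nat.eq_or_lt_of_le hij with h | h
    · subst h; exact le_refl _
    · exact List.pairwise_iff_getElem.mp hsorted i j hi hj h
  -- each probe of B's total equals A's get_time
  have hpt : ∀ lv, totalB pairs ([((0 : Int), (0 : Int))] ++ prefList 0 0 pairs)
      (baseS diffs times) (swS pairs) (sdwS pairs) (PySem.List.len diffs) lv =
      getTime lv diffs times := by
    intro lv
    unfold totalB
    have hlen' : (PySem.List.len diffs : Int) = (pairs.length : Int) := by
      simp [PySem.List.len_eq, hplen]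
    rw [hlen']
    obtain ⟨hlo0, hlohi, hchar⟩ := bisLoop_spec pairs lv hmono
      (pairs.length) 0 pairs.length (by omega) (le_refl _) (by omega) (by omega)
      (fun j hj => ⟨fun h => by omega, fun h => by omega⟩)
    obtain ⟨k, hk⟩ : ∃ k : Nat, bisLoop pairs lv 0 (pairs.length : Int) = (k : Int) :=
      ⟨(bisLoop pairs lv 0 (pairs.length : Int)).toNat, by omega⟩
    rw [hk] at hlohi hchar ⊢
    have hkle : k ≤ pairs.length := by omega
    dsimp only
    have hgetcum : PySem.List.pyGetD ([((0 : Int), (0 : Int))] ++ prefList 0 0 pairs)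
        (k : Int) (0, 0) = (swS (pairs.take k), sdwS (pairs.take k)) := by
      have hcl : ([((0 : Int), (0 : Int))] ++ prefList 0 0 pairs).length = pairs.length + 1 := by
        simp [prefList_length]
      rw [PySem.List.pyGetD_natCast]
      rw [List.getD_eq_getElem _ (0, 0) (by omega)]
      exact cum_getElem pairs k hkle
    rw [hgetcum]
    have hsplit : pairs = pairs.take k ++ pairs.drop k := (List.take_append_drop k pairs).symm
    have hQ : ∀ p ∈ pairs.take k, p.1 ≤ lv := by
      intro p hp
      rw [List.mem_iff_getElem] at hp
      obtain ⟨i, hi, hpi⟩ := hp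
      have hi' : i < k := by
        have h2 : (pairs.take k).length = min k pairs.length := List.length_take
        omega
      rw [List.getElem_take] at hpi
      rw [← hpi]
      exact (hchar i (by omega)).1 (by omega)
    have hR : ∀ p ∈ pairs.drop k, lv < p.1 := by
      intro p hp
      rw [List.mem_iff_getElem] at hp
      obtain ⟨i, hi, hpi⟩ := hp
      rw [List.getElem_drop] at hpi
      rw [← hpi]
      have hlt : k + i < pairs.length := by
        have h2 := List.length_drop (l := pairs) (i := k)
        omega
      exact (hchar (k + i) hlt).2 (by omega)
    have hexval : exS lv pairs = sdwS (pairs.drop k) - lv * swS (pairs.drop k) := by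
      conv_lhs => rw [hsplit]
      exact exS_split_le_gt lv _ _ hQ hR
    have hsw : swS pairs = swS (pairs.take k) + swS (pairs.drop k) := by
      conv_lhs => rw [hsplit]
      exact swS_append _ _
    have hsdw : sdwS pairs = sdwS (pairs.take k) + sdwS (pairs.drop k) := by
      conv_lhs => rw [hsplit]
      exact sdwS_append _ _
    rw [getTime_eq lv diffs times, ← hP0, ← hex lv, hexval]
    linear_combination hsdw - lv * hsw
  rw [hA, hBdef, hcum]
  exact (loops_eq diffs times limit pairs _ _ _ _ _ hpt ((m + 1 - 1).toNat) 1 m m (by omega)).symm
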